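-- pv_equiv track=rewrite | github.com/hemanth41079299/fundamental-analyzer | fundamental-analyzer/services/news_summary_service.py | _tone_label
-- ===== SOURCE A (Python) =====
-- def _tone_label(items: list[dict[str, object]]) -> str:
--     """Estimate the dominant tone for one bucket."""
--     positive = sum(1 for item in items if item.get("impact_direction") == "Positive Tailwind")
--     negative = sum(1 for item in items if item.get("impact_direction") == "Negative Headwind")
--     if positive > negative:
--         return "constructive"
--     if negative > positive:
--         return "cautious"
--     return "mixed"
-- ===== SOURCE B (Python) =====
-- def _tone_label(items: list[dict[str, object]]) -> str:
--     """Estimate the dominant tone for one bucket."""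
--     net = 0
--     for item in items:
--         d = item.get("impact_direction")
--         if d == "Positive Tailwind":
--             net += 1
--         elif d == "Negative Headwind":
--             net -= 1
--     if net > 0:
--         return "constructive"
--     if net < 0:
--         return "cautious"
--     return "mixed"
-- ===== Notes on version B (the rewrite author's own statement) =====
-- stated objective: simpler
-- what changed: Replaces the two separate counting comprehensions and the two-count comparison by a single pass maintaining one signed accumulator whose sign decides the label.
import Mathlib
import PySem

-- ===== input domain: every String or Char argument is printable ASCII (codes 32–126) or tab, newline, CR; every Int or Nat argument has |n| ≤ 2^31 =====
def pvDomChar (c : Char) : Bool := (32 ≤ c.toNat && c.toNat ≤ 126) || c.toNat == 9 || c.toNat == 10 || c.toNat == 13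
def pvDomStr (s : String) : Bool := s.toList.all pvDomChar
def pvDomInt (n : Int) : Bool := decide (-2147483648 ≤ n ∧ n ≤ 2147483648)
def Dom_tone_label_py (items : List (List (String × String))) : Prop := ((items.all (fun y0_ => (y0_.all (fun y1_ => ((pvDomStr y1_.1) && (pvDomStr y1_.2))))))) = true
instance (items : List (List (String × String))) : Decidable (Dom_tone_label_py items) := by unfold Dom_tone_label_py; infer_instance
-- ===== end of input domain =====

-- B replaces A's two counting comprehensions by one pass with a single signed accumulator (objective: simpler).

-- item.get("impact_direction"): first-match lookup in the association list (Python dict get)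
def pvImpact (item : List (String × String)) : Option String :=
  (PySem.Dict.mk item).get? "impact_direction"

-- ===== PORT A =====
def tone_label_py (items : List (List (String × String))) : String :=
  let positive := (items.countP (fun item => pvImpact item == some "Positive Tailwind") : Int)
  let negative := (items.countP (fun item => pvImpact item == some "Negative Headwind") : Int)
  if positive > negative then "constructive"
  else if negative > positive then "cautious"
  else "mixed"

-- ===== PORT B =====
def tone_label_py_alt (items : List (List (String × String))) : String :=
  let net := items.foldl (fun (n : Int) item =>
    match pvImpact item with
    | some d => if d = "Positive Tailwind" then n + 1
                else if d = "Negative Headwind" then n - 1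
                else n
    | none => n) 0
  if net > 0 then "constructive"
  else if net < 0 then "cautious"
  else "mixed"

-- ===== PRECONDITION & SPEC =====
def Spec_tone_label_py (items : List (List (String × String))) (out : String) : Prop := out = tone_label_py_alt items
instance (items : List (List (String × String))) (out : String) : Decidable (Spec_tone_label_py items out) := by unfold Spec_tone_label_py; infer_instance

-- ===== CLAIM (what is proved, stated in full; the proofs are below) =====
def Claim_equal_tone_label_py : Prop := ∀ (items : List (List (String × String))), Dom_tone_label_py items → Spec_tone_label_py items (tone_label_py items)

-- ===== LEMMAS AND PROOFS =====

lemma net_eq_counts (items : List (List (String × String))) (n : Int) :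
    items.foldl (fun (n : Int) item =>
      match pvImpact item with
      | some d => if d = "Positive Tailwind" then n + 1
                  else if d = "Negative Headwind" then n - 1
                  else n
      | none => n) n
    = n + (items.countP (fun item => pvImpact item == some "Positive Tailwind") : Int)
        - (items.countP (fun item => pvImpact item == some "Negative Headwind") : Int) := by
  induction items generalizing n with
  | nil => simp
  | cons x xs ih =>
    simp only [List.foldl_cons, List.countP_cons, ih]
    cases h : pvImpact x with
    | none => simp [h]
    | some d =>
      by_cases hp : d = "Positive Tailwind" <;> by_cases hn : d = "Negative Headwind" <;>
        simp_all <;> push_cast <;> ring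

-- ===== VERDICT (by name: the statement is the Claim_ definition above) =====
theorem tone_label_py_spec : Claim_equal_tone_label_py := by
  intro items _
  unfold Spec_tone_label_py tone_label_py tone_label_py_alt
  rw [net_eq_counts]
  set p := (items.countP (fun item => pvImpact item == some "Positive Tailwind") : Int)
  set q := (items.countP (fun item => pvImpact item == some "Negative Headwind") : Int)
  by_cases h1 : p > q <;> by_cases h2 : q > p <;> simp_all <;> omega
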